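-- pv_equiv track=rewrite | github.com/Francisde/advent-of-code-2017 | src/day16/day16.py | perform_dance
-- ===== SOURCE A (Python) =====
-- def perform_dance(dance_move_list, program_list, repetitions):
--     result = ""
--     original_list = program_list.copy()
--     for j in range(1, repetitions):
--         for dance_move in dance_move_list:
--             if dance_move.startswith("s"):
--                 number = int(dance_move[1:])
--                 program_list = program_list[len(program_list) - number:] + program_list[:len(program_list) - number]
--             if dance_move.startswith("x"):
--                 numbers = dance_move[1:].split("/")
--                 number1 = int(numbers[0])
--                 number2 = int(numbers[1])
--                 char1 = program_list[number1]
--                 program_list[number1] = program_list[number2]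
--                 program_list[number2] = char1
--             if dance_move.startswith("p"):
--                 programs = dance_move[1:].split("/")
--                 program1 = programs[0]
--                 program2 = programs[1]
--                 index1 = 0
--                 index2 = 0
--                 for i in range(len(program_list)):
--                     if program_list[i] == program1:
--                         index1 = i
--                     if program_list[i] == program2:
--                         index2 = i
--                 char1 = program_list[index1]
--                 program_list[index1] = program_list[index2]
--                 program_list[index2] = char1
--
--     for program in program_list:
--         result += program
--     return result
-- ===== SOURCE B (Python) =====
-- def _parse_move(mv):
--     if mv.startswith("s"):
--         return ("s", int(mv[1:]), 0)
--     if mv.startswith("x"):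
--         parts = mv[1:].split("/")
--         return ("x", int(parts[0]), int(parts[1]))
--     if mv.startswith("p"):
--         parts = mv[1:].split("/")
--         return ("p", parts[0], parts[1])
--     return ("n", 0, 0)
--
--
-- def _last_index(lst, x):
--     for i in range(len(lst) - 1, -1, -1):
--         if lst[i] == x:
--             return i
--     return 0
--
--
-- def _apply(lst, op):
--     kind, a, b = op
--     if kind == "s":
--         k = len(lst) - a
--         return lst[k:] + lst[:k]
--     if kind == "x":
--         out = list(lst)
--         out[a], out[b] = out[b], out[a]
--         return out
--     if kind == "p":
--         i, j = _last_index(lst, a), _last_index(lst, b)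
--         out = list(lst)
--         out[i], out[j] = out[j], out[i]
--         return out
--     return lst
--
--
-- def perform_dance(dance_move_list, program_list, repetitions):
--     steps = repetitions - 1
--     if steps <= 0:
--         return "".join(program_list)
--     ops = [_parse_move(mv) for mv in dance_move_list]
--     state = tuple(program_list)
--     seen = {state: 0}
--     trajectory = [state]
--     while len(trajectory) <= steps:
--         for op in ops:
--             state = tuple(_apply(state, op))
--         if state in seen:
--             start = seen[state]
--             period = len(trajectory) - start
--             return "".join(trajectory[start + (steps - start) % period])
--         seen[state] = len(trajectory)
--         trajectory.append(state)
--     return "".join(state)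
-- ===== Notes on version B (the rewrite author's own statement) =====
-- stated objective: faster
-- what changed: B parses the move list once into tagged operations and detects when the arrangement sequence repeats (memoizing each state's step index in a dict), jumping to step start+((repetitions-1-start) mod period) instead of re-parsing and simulating all repetitions-1 rounds.
import Mathlib
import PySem

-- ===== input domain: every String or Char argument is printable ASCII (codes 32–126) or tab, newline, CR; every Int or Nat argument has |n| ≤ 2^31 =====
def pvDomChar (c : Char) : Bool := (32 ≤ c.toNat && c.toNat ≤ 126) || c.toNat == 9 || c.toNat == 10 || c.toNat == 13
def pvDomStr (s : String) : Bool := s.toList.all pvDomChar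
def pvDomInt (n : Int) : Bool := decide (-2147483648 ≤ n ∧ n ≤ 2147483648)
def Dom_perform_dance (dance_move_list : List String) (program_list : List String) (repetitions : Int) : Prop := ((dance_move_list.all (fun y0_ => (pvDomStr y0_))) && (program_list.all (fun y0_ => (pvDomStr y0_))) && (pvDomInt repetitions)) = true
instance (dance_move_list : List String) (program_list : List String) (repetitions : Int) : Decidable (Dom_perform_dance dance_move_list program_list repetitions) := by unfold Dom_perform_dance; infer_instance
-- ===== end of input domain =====

-- B parses the dance moves ONCE into tagged operations and replaces A's brute-force repetition
-- loop by cycle detection on the sequence of arrangements (each state memoized in a dict),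
-- jumping to the answer by modular arithmetic; note Python A mutates program_list in place
-- (x/p moves) while B does not — the equivalence proved here is about the RETURN value only.

-- dance_move[1:].split("/"); the separator "/" is non-empty so split? never returns none
def pvSplitSlash (mv : String) : List String :=
  (PySem.Str.split? (PySem.Str.slice mv (some 1) none) "/").getD []

-- ===== PORT A =====
-- A's p-move inner loop: for i in range(len(pl)): keep the LAST index where pl[i] equals each
-- program (defaults 0 when absent).  Indices i satisfy 0 ≤ i < len, so pl.getD i "" is exact.
def pvPIndicesA (pl : List String) (p1 p2 : String) : Nat × Nat :=
  (List.range pl.length).foldl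
    (fun (acc : Nat × Nat) i =>
      let acc := if pl.getD i "" == p1 then (i, acc.2) else acc
      if pl.getD i "" == p2 then (acc.1, i) else acc)
    (0, 0)

-- body of A's inner 'for dance_move in dance_move_list' loop; where Python raises
-- (int() ValueError, IndexError) the port leaves the list unchanged — Pre_ excludes those inputs
def pvStepA (pl : List String) (mv : String) : List String :=
  let pl :=
    if PySem.Str.startswith mv "s" then
      match PySem.Int.ofStr? (PySem.Str.slice mv (some 1) none) with
      | some number =>
          PySem.List.slice pl (some ((pl.length : Int) - number)) none ++
          PySem.List.slice pl none (some ((pl.length : Int) - number))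
      | none => pl
    else pl
  let pl :=
    if PySem.Str.startswith mv "x" then
      match (pvSplitSlash mv)[0]?, (pvSplitSlash mv)[1]? with
      | some s1, some s2 =>
        match PySem.Int.ofStr? s1, PySem.Int.ofStr? s2 with
        | some n1, some n2 =>
          match PySem.List.pyGet? pl n1, PySem.List.pyGet? pl n2 with
          | some c1, some c2 =>
              -- pl[n1] = pl[n2]; pl[n2] = char1  (python index normalization for negatives)
              let i1 := (if n1 < 0 then n1 + pl.length else n1).toNat
              let i2 := (if n2 < 0 then n2 + pl.length else n2).toNat
              (pl.set i1 c2).set i2 c1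
          | _, _ => pl
        | _, _ => pl
      | _, _ => pl
    else pl
  let pl :=
    if PySem.Str.startswith mv "p" then
      match (pvSplitSlash mv)[0]?, (pvSplitSlash mv)[1]? with
      | some p1, some p2 =>
          let idx := pvPIndicesA pl p1 p2
          -- char1 = pl[index1]; pl[index1] = pl[index2]; pl[index2] = char1
          -- (both indices < len whenever len > 0; Pre_ excludes the empty-list IndexError)
          let c1 := pl.getD idx.1 ""
          (pl.set idx.1 (pl.getD idx.2 "")).set idx.2 c1
      | _, _ => pl
    else pl
  pl

def perform_dance (dance_move_list : List String) (program_list : List String) (repetitions : Int) : String :=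
  let final := (PySem.List.pyRange 1 repetitions 1).foldl
    (fun cur _ => dance_move_list.foldl pvStepA cur) program_list
  -- result = ""; for program in final: result += program   (exact as List Char concatenation)
  String.ofList (final.foldl (fun (acc : List Char) p => acc ++ p.toList) [])

-- ===== PORT B =====
-- the tuples _parse_move returns: ("s",n,0) / ("x",i,j) / ("p",a,b) / ("n",0,0)
inductive PvMove where
  | spin : Int → PvMove
  | exch : Int → Int → PvMove
  | part : String → String → PvMove
  | skip : PvMove
deriving DecidableEq, Repr

-- _parse_move; where Python B raises (int() ValueError, a missing '/'-field) the port yields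
-- skip — Pre_ excludes those inputs whenever the parse is reached (repetitions ≥ 2)
def pvParse (mv : String) : PvMove :=
  if PySem.Str.startswith mv "s" then
    match PySem.Int.ofStr? (PySem.Str.slice mv (some 1) none) with
    | some n => .spin n
    | none => .skip
  else if PySem.Str.startswith mv "x" then
    match (pvSplitSlash mv)[0]?, (pvSplitSlash mv)[1]? with
    | some s1, some s2 =>
      match PySem.Int.ofStr? s1, PySem.Int.ofStr? s2 with
      | some n1, some n2 => .exch n1 n2
      | _, _ => .skip
    | _, _ => .skip
  else if PySem.Str.startswith mv "p" then
    match (pvSplitSlash mv)[0]?, (pvSplitSlash mv)[1]? with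
    | some p1, some p2 => .part p1 p2
    | _, _ => .skip
  else .skip

-- _last_index: for i in range(len(lst)-1, -1, -1): first match from the end, else 0
def pvLastIdxAux (pl : List String) (x : String) : Nat → Nat
  | 0 => 0
  | i + 1 => if pl.getD i "" == x then i else pvLastIdxAux pl x i

def pvLastIdx (pl : List String) (x : String) : Nat := pvLastIdxAux pl x pl.length

-- _apply(lst, op); an out-of-range exchange index (IndexError in Python B, as in A) leaves the
-- list unchanged — Pre_ excludes those inputs
def pvApply (pl : List String) : PvMove → List String
  | .spin n =>
      let k := (pl.length : Int) - n
      PySem.List.slice pl (some k) none ++ PySem.List.slice pl none (some k)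
  | .exch n1 n2 =>
      match PySem.List.pyGet? pl n1, PySem.List.pyGet? pl n2 with
      | some c1, some c2 =>
          let i1 := (if n1 < 0 then n1 + pl.length else n1).toNat
          let i2 := (if n2 < 0 then n2 + pl.length else n2).toNat
          (pl.set i1 c2).set i2 c1
      | _, _ => pl
  | .part a b =>
      let i := pvLastIdx pl a
      let j := pvLastIdx pl b
      (pl.set i (pl.getD j "")).set j (pl.getD i "")
  | .skip => pl

-- 'for op in ops: state = _apply(state, op)'
def pvRoundB (ops : List PvMove) (pl : List String) : List String := ops.foldl pvApply pl

-- the 'while len(trajectory) <= steps' loop; fuel = steps + 1 - len(trajectory) (an invariant);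
-- trajectory lookups are in range whenever they happen (proved below)
def pvCycleLoop (ops : List PvMove) (steps : Nat) :
    Nat → List String → PySem.Dict (List String) Nat → List (List String) → String
  | 0, state, _, _ => PySem.Str.join "" state
  | fuel + 1, state, seen, traj =>
    let state' := pvRoundB ops state
    match seen.get? state' with
    | some start =>
        PySem.Str.join "" (traj.getD (start + (steps - start) % (traj.length - start)) [])
    | none =>
        pvCycleLoop ops steps fuel state'
          (seen.insert state' traj.length) (traj ++ [state'])

def perform_dance_alt (dance_move_list : List String) (program_list : List String) (repetitions : Int) : String :=
  let steps := repetitions - 1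
  if steps ≤ 0 then PySem.Str.join "" program_list
  else
    let ops := dance_move_list.map pvParse
    pvCycleLoop ops steps.toNat steps.toNat program_list
      (PySem.Dict.empty.insert program_list 0) [program_list]

-- ===== PRECONDITION & SPEC =====
-- syntactic well-formedness of one dance move against the (unchanging) list length n:
-- 's': int(rest) parses; 'x': two '/'-fields parsing to in-range indices; 'p': two fields and a
-- non-empty list (A's p-swap indexes position 0 even when nothing matched)
def pvMoveOK (n : Nat) (mv : String) : Bool :=
  if PySem.Str.startswith mv "s" then
    (PySem.Int.ofStr? (PySem.Str.slice mv (some 1) none)).isSome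
  else if PySem.Str.startswith mv "x" then
    match pvSplitSlash mv with
    | s1 :: s2 :: _ =>
      match PySem.Int.ofStr? s1, PySem.Int.ofStr? s2 with
      | some n1, some n2 =>
          decide (-(n : Int) ≤ n1 ∧ n1 < n ∧ -(n : Int) ≤ n2 ∧ n2 < n)
      | _, _ => false
    | _ => false
  else if PySem.Str.startswith mv "p" then
    decide (2 ≤ (pvSplitSlash mv).length ∧ 0 < n)
  else true

-- Pre_ excludes exactly the inputs on which the Python A raises: repetitions ≥ 2 together with a
-- malformed move (int() ValueError, missing '/'-field, out-of-range swap index, p-move on an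
-- empty list); with repetitions ≤ 1 the dance loop never runs and A always returns.
def Pre_perform_dance (dance_move_list : List String) (program_list : List String) (repetitions : Int) : Prop :=
  repetitions ≤ 1 ∨ ∀ mv ∈ dance_move_list, pvMoveOK program_list.length mv = true
instance (dance_move_list : List String) (program_list : List String) (repetitions : Int) : Decidable (Pre_perform_dance dance_move_list program_list repetitions) := by unfold Pre_perform_dance; infer_instance

def pvWitness_perform_dance : List String × List String × Int :=
  (["s1", "x0/2", "pa/b"], ["a", "b", "c"], 3)

def Spec_perform_dance (dance_move_list : List String) (program_list : List String) (repetitions : Int) (out : String) : Prop := out = perform_dance_alt dance_move_list program_list repetitions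
instance (dance_move_list : List String) (program_list : List String) (repetitions : Int) (out : String) : Decidable (Spec_perform_dance dance_move_list program_list repetitions out) := by unfold Spec_perform_dance; infer_instance

-- ===== CLAIM (what is proved, stated in full; the proofs are below) =====
def Claim_equal_perform_dance : Prop := ∀ (dance_move_list : List String) (program_list : List String) (repetitions : Int), Dom_perform_dance dance_move_list program_list repetitions → Pre_perform_dance dance_move_list program_list repetitions → Spec_perform_dance dance_move_list program_list repetitions (perform_dance dance_move_list program_list repetitions)

-- ===== LEMMAS AND PROOFS =====

-- a string cannot start with two different prefixes of the same length
theorem pvStarts_excl (s c d : String) (hne : c.toList ≠ d.toList)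
    (hlen : c.toList.length = d.toList.length)
    (hc : PySem.Str.startswith s c = true) :
    PySem.Str.startswith s d = false := by
  by_contra hd
  rw [Bool.not_eq_false, PySem.Str.startswith_eq, PySem.Chars.startswith_iff] at hd
  rw [PySem.Str.startswith_eq, PySem.Chars.startswith_iff] at hc
  rcases List.prefix_or_prefix_of_prefix hc hd with h | h
  · exact hne (h.eq_of_length hlen)
  · exact hne (h.eq_of_length hlen.symm).symm

-- A's forward keep-last scan equals B's backward first-match scan (both default to 0)
theorem pvPIndicesA_eq (pl : List String) (p1 p2 : String) :
    pvPIndicesA pl p1 p2 = (pvLastIdx pl p1, pvLastIdx pl p2) := by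
  unfold pvPIndicesA pvLastIdx
  induction pl.length with
  | zero => rfl
  | succ n ih =>
      rw [List.range_succ, List.foldl_append, ih]
      simp only [List.foldl_cons, List.foldl_nil, pvLastIdxAux]
      by_cases h1 : pl[n]?.getD "" = p1 <;> by_cases h2 : pl[n]?.getD "" = p2 <;>
        by_cases h3 : p1 = p2 <;> simp_all [List.getD]

-- applying the parsed form of one move is A's string-dispatch step for that move
set_option maxHeartbeats 1000000 in
theorem pvApply_parse (pl : List String) (mv : String) :
    pvApply pl (pvParse mv) = pvStepA pl mv := by
  unfold pvParse pvStepA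
  by_cases hs : PySem.Str.startswith mv "s"
  · have hx := pvStarts_excl mv "s" "x" (by decide) (by decide) hs
    have hp := pvStarts_excl mv "s" "p" (by decide) (by decide) hs
    simp only [hs, hx, hp, Bool.false_eq_true, if_true, if_false]
    cases PySem.Int.ofStr? (PySem.Str.slice mv (some 1) none) <;> rfl
  · by_cases hx : PySem.Str.startswith mv "x"
    · have hp := pvStarts_excl mv "x" "p" (by decide) (by decide) hx
      simp only [hs, hx, hp, Bool.false_eq_true, if_true, if_false]
      cases (pvSplitSlash mv)[0]? with
      | none => rfl
      | some s1 =>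
        cases (pvSplitSlash mv)[1]? with
        | none => rfl
        | some s2 =>
          dsimp only
          cases PySem.Int.ofStr? s1 with
          | none => rfl
          | some n1 =>
            cases PySem.Int.ofStr? s2 with
            | none => rfl
            | some n2 =>
              dsimp only
              cases hg1 : PySem.List.pyGet? pl n1 <;> cases hg2 : PySem.List.pyGet? pl n2 <;>
                simp only [pvApply, hg1, hg2]
    · by_cases hp : PySem.Str.startswith mv "p"
      · simp only [hs, hx, hp, Bool.false_eq_true, if_true, if_false]
        cases (pvSplitSlash mv)[0]? with
        | none => rfl
        | some p1 =>
          cases (pvSplitSlash mv)[1]? with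
          | none => rfl
          | some p2 =>
            dsimp only
            simp only [pvApply, pvPIndicesA_eq]
      · simp only [hs, hx, hp, Bool.false_eq_true, if_false]
        rfl

-- one B round (fold of pvApply over the parsed moves) is one A round
theorem pvRoundB_eq (dml : List String) (cur : List String) :
    pvRoundB (dml.map pvParse) cur = dml.foldl pvStepA cur := by
  unfold pvRoundB
  rw [List.foldl_map]
  have h : (fun (s : List String) mv => pvApply s (pvParse mv)) = pvStepA := by
    funext s mv; exact pvApply_parse s mv
  rw [h]

-- folding a body that ignores the loop variable is function iteration
theorem foldl_const_iterate {α β : Type} (g : α → α) (l : List β) (init : α) :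
    l.foldl (fun s _ => g s) init = g^[l.length] init := by
  induction l generalizing init with
  | nil => rfl
  | cons x l ih =>
      simp only [List.foldl_cons, List.length_cons, ih, Function.iterate_succ_apply]

-- periodicity: once f^[a+p] x = f^[a] x, every later iterate reduces modulo p
theorem iterate_period {α : Type} (f : α → α) (x : α) (a p : Nat) (hp : 0 < p)
    (h : f^[a + p] x = f^[a] x) :
    ∀ m, a ≤ m → f^[m] x = f^[a + (m - a) % p] x := by
  intro m
  induction m using Nat.strong_induction_on with
  | _ m ih =>
    intro ham
    by_cases hlt : m < a + p
    · rw [Nat.mod_eq_of_lt (by omega), show a + (m - a) = m from by omega]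
    · have e1 : f^[m] x = f^[m - (a + p)] (f^[a + p] x) := by
        rw [← Function.iterate_add_apply]; congr 1; omega
      rw [e1, h, ← Function.iterate_add_apply, show m - (a + p) + a = m - p from by omega,
        ih (m - p) (by omega) (by omega)]
      have e3 : (m - p - a) % p = (m - a) % p := by
        have e4 : m - a = (m - p - a) + p := by omega
        rw [e4, Nat.add_mod_right]
      rw [e3]

-- correctness of the cycle-detection loop
theorem pvCycleLoop_eq (ops : List PvMove) (steps : Nat) (x0 : List String) :
    ∀ (fuel m : Nat) (state : List String) (seen : PySem.Dict (List String) Nat)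
      (traj : List (List String)),
      traj.length = m + 1 →
      fuel + m = steps →
      state = (pvRoundB ops)^[m] x0 →
      (∀ j, j < m + 1 → traj.getD j [] = (pvRoundB ops)^[j] x0) →
      (∀ s i, seen.get? s = some i → i ≤ m ∧ traj.getD i [] = s) →
      pvCycleLoop ops steps fuel state seen traj =
        PySem.Str.join "" ((pvRoundB ops)^[steps] x0) := by
  intro fuel
  induction fuel with
  | zero =>
      intro m state seen traj h1 h2 h3 _ _
      have hm : m = steps := by omega
      subst hm
      simpa [pvCycleLoop] using congrArg (PySem.Str.join "") h3
  | succ fuel ih =>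
      intro m state seen traj h1 h2 h3 h4 h5
      have hstate' : pvRoundB ops state = (pvRoundB ops)^[m + 1] x0 := by
        rw [h3, ← Function.iterate_succ_apply' (pvRoundB ops) m x0]
      simp only [pvCycleLoop]
      cases hseen : seen.get? (pvRoundB ops state) with
      | some start =>
          obtain ⟨hstart_le, htraj_start⟩ := h5 _ _ hseen
          have hper : (pvRoundB ops)^[start + (m + 1 - start)] x0 = (pvRoundB ops)^[start] x0 := by
            rw [show start + (m + 1 - start) = m + 1 from by omega, ← hstate',
              ← htraj_start, h4 start (by omega)]
          have hp : 0 < m + 1 - start := by omega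
          have hsteps : (pvRoundB ops)^[steps] x0 =
              (pvRoundB ops)^[start + (steps - start) % (m + 1 - start)] x0 :=
            iterate_period (pvRoundB ops) x0 start (m + 1 - start) hp hper steps (by omega)
          have hidx : start + (steps - start) % (m + 1 - start) < m + 1 := by
            have := Nat.mod_lt (steps - start) hp
            omega
          rw [h1, hsteps, ← h4 _ hidx]
      | none =>
          refine ih (m + 1) (pvRoundB ops state) _ (traj ++ [pvRoundB ops state]) ?_ (by omega)
            hstate' ?_ ?_
          · simp [h1]
          · intro j hj
            by_cases hjlt : j < m + 1
            · rw [List.getD_append _ _ _ _ (h1 ▸ hjlt)]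
              exact h4 j hjlt
            · have hj' : j = m + 1 := by omega
              subst hj'
              have hcat : (traj ++ [pvRoundB ops state]).getD traj.length [] = pvRoundB ops state := by
                simp [List.getD]
              rw [h1] at hcat
              rw [hcat, hstate']
          · intro s i hget
            rw [PySem.Dict.get?_insert] at hget
            by_cases hs : s = pvRoundB ops state
            · rw [if_pos hs] at hget
              injection hget with hh
              subst hh
              have hcat : (traj ++ [pvRoundB ops state]).getD traj.length [] = pvRoundB ops state := by
                simp [List.getD]
              exact ⟨by omega, by rw [hcat, hs]⟩
            · rw [if_neg hs] at hget
              obtain ⟨hle, heq⟩ := h5 _ _ hget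
              exact ⟨by omega, by rw [List.getD_append _ _ _ _ (by omega), heq]⟩

-- Chars.join with the empty separator is concatenation
theorem chars_join_nil (css : List (List Char)) :
    PySem.Chars.join [] css = css.flatten := by
  induction css with
  | nil => simp [PySem.Chars.join_nil]
  | cons c rest ih =>
      cases rest with
      | nil => simp [PySem.Chars.join_singleton]
      | cons d rest' =>
          rw [PySem.Chars.join_cons_cons, ih]
          simp

-- A's '+='-join equals "".join
theorem joinA_eq (l : List String) :
    String.ofList (l.foldl (fun (acc : List Char) p => acc ++ p.toList) []) =
    PySem.Str.join "" l := by
  rw [PySem.List.foldl_append_eq_flatMap String.toList l []]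
  conv_rhs => rw [← String.ofList_toList (s := PySem.Str.join "" l)]
  rw [PySem.Str.toList_join]
  simp [chars_join_nil, List.flatMap_def]

-- ===== VERDICT (by name: the statement is the Claim_ definition above) =====
theorem perform_dance_spec : Claim_equal_perform_dance := by
  intro dml pl reps _ _
  show perform_dance dml pl reps = perform_dance_alt dml pl reps
  unfold perform_dance perform_dance_alt
  have hbody : (fun (cur : List String) (_ : Int) => dml.foldl pvStepA cur) =
      (fun (cur : List String) (_ : Int) => pvRoundB (dml.map pvParse) cur) := by
    funext cur x
    exact (pvRoundB_eq dml cur).symm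
  rw [hbody, foldl_const_iterate (pvRoundB (dml.map pvParse)), PySem.List.length_pyRange_one]
  by_cases hle : reps - 1 ≤ 0
  · rw [if_pos hle, show (reps - 1).toNat = 0 from by omega, Function.iterate_zero_apply]
    exact joinA_eq pl
  · rw [if_neg hle]
    rw [pvCycleLoop_eq (dml.map pvParse) (reps - 1).toNat pl (reps - 1).toNat 0 pl _ [pl] rfl
      rfl rfl
      (by intro j hj; interval_cases j; rfl)
      (by
        intro s i hget
        rw [PySem.Dict.get?_insert] at hget
        by_cases hs : s = pl
        · rw [if_pos hs] at hget
          injection hget with hh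
          subst hh
          exact ⟨le_refl 0, hs.symm⟩
        · rw [if_neg hs, PySem.Dict.get?_empty] at hget
          cases hget)]
    exact joinA_eq _
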